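-- pv_equiv track=rewrite | github.com/razin99/google_foo | cake/solution.py | solution
-- ===== SOURCE A (Python) =====
-- def pattern_ok(s, size):
--     checking = s[0:size]
--     for i in range(0, len(s), size):
--         if checking != s[i:i+size]:
--             return False
--     else:
--         return True
--
-- def solution(s):
--     if len(s) == 0:
--         return 0
--
--     chars = list(dict.fromkeys(s))
--     char_per_seg = len(s) // len(chars)
--
--     while char_per_seg > 1:
--         # if (len(s)/char_per_seg).is_integer() and pattern_ok(s, len(s)//char_per_seg):
--         if len(s) % char_per_seg == 0 and pattern_ok(s, len(s)//char_per_seg):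
--             return char_per_seg
--
--         char_per_seg -= 1
--     return char_per_seg
-- ===== SOURCE B (Python) =====
-- def solution(s):
--     n = len(s)
--     if n == 0:
--         return 0
--     small, large = [], []
--     i = 1
--     while i * i <= n:
--         if n % i == 0:
--             small.append(i)
--             if i != n // i:
--                 large.append(n // i)
--         i += 1
--     for L in small + large[::-1]:  # all divisors of n, ascending
--         if s == s[:L] * (n // L):
--             return n // L
-- ===== Notes on version B (the rewrite author's own statement) =====
-- stated objective: faster
-- what changed: A deduplicates the characters and counts segment candidates downward from n//distinct, re-verifying each by slice-by-slice comparison; B enumerates the divisors of n by sqrt(n) trial division and returns n//L for the smallest divisor L whose prefix repeated fills s, checked by one string multiplication.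
import Mathlib
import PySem

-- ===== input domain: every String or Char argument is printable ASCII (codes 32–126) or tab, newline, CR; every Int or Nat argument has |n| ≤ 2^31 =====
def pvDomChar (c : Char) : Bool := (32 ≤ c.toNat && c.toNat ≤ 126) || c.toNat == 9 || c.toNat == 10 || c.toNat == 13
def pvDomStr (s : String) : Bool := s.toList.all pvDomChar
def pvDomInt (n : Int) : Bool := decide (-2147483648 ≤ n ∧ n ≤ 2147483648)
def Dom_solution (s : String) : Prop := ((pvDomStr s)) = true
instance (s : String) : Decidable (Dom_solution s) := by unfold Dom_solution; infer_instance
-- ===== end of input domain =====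

-- B replaces A's downward count-of-segments search (seeded by the distinct-character count and
-- re-verified slice by slice) with a sqrt(n) divisor enumeration and an ascending scan for the
-- smallest repeating segment length; measurably faster by a constant factor.

-- ===== PORT A =====

-- pattern_ok(s, size): checking = s[0:size]; for i in range(0, len(s), size): if checking != s[i:i+size]: return False; else: return True
def pattern_ok (s : List Char) (size : Int) : Bool :=
  let checking := PySem.List.slice s (some 0) (some size)
  (PySem.List.pyRange 0 (s.length : Int) size).all
    (fun i => PySem.List.slice s (some i) (some (i + size)) == checking)

-- the 'while char_per_seg > 1' loop of A
def solLoop (cs : List Char) (k : Int) : Int :=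
  if 1 < k then
    if PySem.Int.mod (cs.length : Int) k == 0
        && pattern_ok cs (PySem.Int.floordiv (cs.length : Int) k) then
      k
    else
      solLoop cs (k - 1)
  else k
termination_by k.toNat
decreasing_by omega

def solution (s : String) : Int :=
  let cs := s.toList
  if cs.length = 0 then 0
  else
    let chars := PySem.List.dedup cs   -- list(dict.fromkeys(s))
    solLoop cs (PySem.Int.floordiv (cs.length : Int) (chars.length : Int))

-- ===== PORT B =====

-- the 'while i * i <= n' divisor-collecting loop of B
def divLoop (n i : Nat) (small large : List Nat) : List Nat × List Nat :=
  if h : i * i ≤ n then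
    if n % i = 0 then
      divLoop n (i + 1) (small ++ [i]) (if i ≠ n / i then large ++ [n / i] else large)
    else
      divLoop n (i + 1) small large
  else (small, large)
termination_by n + 1 - i
decreasing_by
  all_goals
    rcases Nat.eq_zero_or_pos i with h0 | h0
    · omega
    · have : i ≤ i * i := Nat.le_mul_of_pos_left i h0
      omega

-- the 'for L in small + large[::-1]' loop of B; [] is unreachable (L = n always passes the check)
def scanLoop (cs : List Char) (n : Nat) : List Nat → Int
  | [] => 0
  | L :: rest =>
    if cs == (List.replicate (n / L) (cs.take L)).flatten then ((n / L : Nat) : Int)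
    else scanLoop cs n rest

def solution_alt (s : String) : Int :=
  let cs := s.toList
  let n := cs.length
  if n = 0 then 0
  else
    let p := divLoop n 1 [] []
    scanLoop cs n (p.1 ++ p.2.reverse)

-- ===== PRECONDITION & SPEC =====
def Spec_solution (s : String) (out : Int) : Prop := out = solution_alt s
instance (s : String) (out : Int) : Decidable (Spec_solution s out) := by unfold Spec_solution; infer_instance

-- ===== CLAIM (what is proved, stated in full; the proofs are below) =====
def Claim_equal_solution : Prop := ∀ (s : String), Dom_solution s → Spec_solution s (solution s)

-- ===== LEMMAS AND PROOFS =====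

-- 'L is a valid segment length of cs': the check B performs, plus positivity and divisibility
def chkQ (cs : List Char) (L : Nat) : Prop :=
  0 < L ∧ cs.length % L = 0 ∧ cs = (List.replicate (cs.length / L) (cs.take L)).flatten

theorem chkQ_full (cs : List Char) (h : cs ≠ []) : chkQ cs cs.length := by
  have hn : 0 < cs.length := List.length_pos_iff.mpr h
  refine ⟨hn, Nat.mod_self _, ?_⟩
  simp [Nat.div_self hn]

@[reducible] def chkQ_dec (cs : List Char) : DecidablePred (chkQ cs) := fun _ => by
  unfold chkQ; infer_instance

-- the smallest valid segment length
def Lmin (cs : List Char) (h : cs ≠ []) : Nat :=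
  @Nat.find (chkQ cs) (chkQ_dec cs) ⟨cs.length, chkQ_full cs h⟩

theorem Lmin_spec (cs : List Char) (h : cs ≠ []) : chkQ cs (Lmin cs h) :=
  @Nat.find_spec (chkQ cs) (chkQ_dec cs) _

theorem Lmin_min (cs : List Char) (h : cs ≠ []) {L : Nat} (hQ : chkQ cs L) :
    Lmin cs h ≤ L :=
  @Nat.find_min' (chkQ cs) (chkQ_dec cs) _ _ hQ

theorem Lmin_pos (cs : List Char) (h : cs ≠ []) : 0 < Lmin cs h := (Lmin_spec cs h).1

theorem Lmin_dvd (cs : List Char) (h : cs ≠ []) : Lmin cs h ∣ cs.length :=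
  Nat.dvd_of_mod_eq_zero (Lmin_spec cs h).2.1

theorem Lmin_le (cs : List Char) (h : cs ≠ []) : Lmin cs h ≤ cs.length :=
  Nat.le_of_dvd (List.length_pos_iff.mpr h) (Lmin_dvd cs h)

-- inside a flattened replicate, every aligned block of length L is the block
theorem block_of_flat (t : List Char) (L : Nat) (ht : t.length = L) :
    ∀ (j m : Nat), j < m →
      (((List.replicate m t).flatten.drop (j * L)).take L = t) := by
  intro j
  induction j with
  | zero =>
    intro m hm
    match m, hm with
    | m + 1, _ =>
      simp only [List.replicate_succ, List.flatten_cons, Nat.zero_mul, List.drop_zero]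
      rw [List.take_append_of_le_length (by omega), ← ht, List.take_length]
  | succ j ih =>
    intro m hm
    match m, hm with
    | m + 1, hm =>
      simp only [List.replicate_succ, List.flatten_cons]
      rw [Nat.succ_mul, Nat.add_comm, ← List.drop_drop, List.drop_append_of_le_length (by omega),
        ← ht, List.drop_length, ht]
      simpa using ih m (by omega)

-- flatten/replicate equality ↔ every aligned block of length L equals the first block
theorem flat_iff (k : Nat) : ∀ (L : Nat) (cs : List Char), cs.length = k * L → 0 < L →
    (cs = (List.replicate k (cs.take L)).flatten ↔
      ∀ j < k, (cs.drop (j * L)).take L = cs.take L) := by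
  induction k with
  | zero =>
    intro L cs hlen hL
    have : cs = [] := List.length_eq_zero_iff.mp (by omega)
    simp [this]
  | succ k ih =>
    intro L cs hlen hL
    have hlen' : cs.length = k * L + L := by rw [hlen, Nat.succ_mul]
    have ht : (cs.take L).length = L := by
      rw [List.length_take]; omega
    constructor
    · intro hflat j hj
      have hb := block_of_flat (cs.take L) L ht j (k + 1) hj
      rw [← hflat] at hb
      exact hb
    · intro hall
      have hsplit : cs = cs.take L ++ cs.drop L := (List.take_append_drop L cs).symm
      rcases Nat.eq_zero_or_pos k with hk0 | hkpos
      · subst hk0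
        have : cs.take L = cs := List.take_of_length_le (by omega)
        simp [this]
      · have h1 : (cs.drop L).take L = cs.take L := by
          have := hall 1 (by omega)
          simpa using this
        have hd : (cs.drop L).length = k * L := by
          rw [List.length_drop]; omega
        have hshift : ∀ j < k, ((cs.drop L).drop (j * L)).take L = (cs.drop L).take L := by
          intro j hj
          rw [List.drop_drop, h1]
          have := hall (j + 1) (by omega)
          rw [Nat.succ_mul] at this
          rw [Nat.add_comm]
          exact this
        have := (ih L (cs.drop L) hd hL).mpr hshift
        rw [h1] at this
        calc cs = cs.take L ++ cs.drop L := hsplit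
          _ = cs.take L ++ (List.replicate k (cs.take L)).flatten := by rw [← this]
          _ = (List.replicate (k + 1) (cs.take L)).flatten := by
              simp [List.replicate_succ]

-- A's pattern_ok, at a segment length dividing the string, is B's replicate check
theorem patternOk_iff (cs : List Char) (L : Nat) (hL : 0 < L) (hdvd : cs.length % L = 0) :
    (pattern_ok cs (L : Int) = true ↔
      cs = (List.replicate (cs.length / L) (cs.take L)).flatten) := by
  have hkL : cs.length = (cs.length / L) * L :=
    (Nat.div_mul_cancel (Nat.dvd_of_mod_eq_zero hdvd)).symm
  set k := cs.length / L with hk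
  rw [flat_iff k L cs hkL hL]
  unfold pattern_ok
  rw [PySem.List.slice_zero_start, PySem.List.slice_to_natCast]
  rw [PySem.List.pyRange_of_pos 0 (cs.length : Int) (by exact_mod_cast hL)]
  have hcount : (if (0:Int) < (cs.length : Int) then
      (((cs.length : Int) - 0 + (L : Int) - 1) / (L : Int)).toNat else 0) = k := by
    rcases Nat.eq_zero_or_pos cs.length with h0 | hpos
    · have hk0 : k = 0 := by rw [hk, h0]; exact Nat.zero_div _
      simp [h0, hk0]
    · rw [if_pos (by exact_mod_cast hpos)]
      have harith : (cs.length : Int) - 0 + (L : Int) - 1 = ((L : Int) - 1) + (k : Int) * (L : Int) := by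
        push_cast [hkL]
        ring
      rw [harith, Int.add_mul_ediv_right _ _ (by exact_mod_cast hL.ne')]
      rw [Int.ediv_eq_zero_of_lt (by omega) (by omega)]
      simp
  rw [hcount]
  rw [List.all_map, List.all_eq_true]
  constructor
  · intro hall j hj
    have := hall j (List.mem_range.mpr hj)
    simp only [Function.comp] at this
    rw [show (0 : Int) + (L : Int) * (j : Int) = ((L * j : Nat) : Int) by push_cast; ring,
      show ((L * j : Nat) : Int) + (L : Int) = ((L * j : Nat) : Int) + ((L : Nat) : Int) by norm_num,
      PySem.List.slice_natCast_add] at this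
    rw [Nat.mul_comm j L]
    exact beq_iff_eq.mp this
  · intro hall j hjmem
    have hj := List.mem_range.mp hjmem
    simp only [Function.comp]
    rw [show (0 : Int) + (L : Int) * (j : Int) = ((L * j : Nat) : Int) by push_cast; ring,
      show ((L * j : Nat) : Int) + (L : Int) = ((L * j : Nat) : Int) + ((L : Nat) : Int) by norm_num,
      PySem.List.slice_natCast_add]
    rw [Nat.mul_comm L j]
    exact beq_iff_eq.mpr (hall j hj)

-- every character of a valid segmentation lies in the first segment,
-- so the dedup count bounds every valid segment length from below
theorem dedup_le (cs : List Char) {L : Nat} (hQ : chkQ cs L) :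
    (PySem.List.dedup cs).length ≤ L := by
  obtain ⟨hL, hmod, hflat⟩ := hQ
  have hsub : ∀ x ∈ PySem.List.dedup cs, x ∈ cs.take L := by
    intro x hx
    have hxcs : x ∈ cs := (PySem.List.mem_dedup cs x).mp hx
    rw [hflat] at hxcs
    obtain ⟨l, hl, hxl⟩ := List.mem_flatten.mp hxcs
    rwa [List.eq_of_mem_replicate hl] at hxl
  have h1 : (PySem.List.dedup cs).length = (PySem.List.dedup cs).toFinset.card :=
    (List.toFinset_card_of_nodup (PySem.List.nodup_dedup cs)).symm
  have h2 : (PySem.List.dedup cs).toFinset ⊆ (cs.take L).toFinset := by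
    intro x hx
    rw [List.mem_toFinset] at *
    exact hsub x hx
  calc (PySem.List.dedup cs).length
      = (PySem.List.dedup cs).toFinset.card := h1
    _ ≤ (cs.take L).toFinset.card := Finset.card_le_card h2
    _ ≤ (cs.take L).length := List.toFinset_card_le _
    _ ≤ L := by rw [List.length_take]; omega

-- above n / Lmin, A's loop guard is false
theorem guardFalseAbove (cs : List Char) (h : cs ≠ []) {m : Nat}
    (hm : cs.length / Lmin cs h < m) (h1 : 1 < m) :
    ¬ (cs.length % m = 0 ∧ pattern_ok cs ((cs.length / m : Nat) : Int) = true) := by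
  rintro ⟨hmod, hpat⟩
  have hn : 0 < cs.length := List.length_pos_iff.mpr h
  have hmdvd : m ∣ cs.length := Nat.dvd_of_mod_eq_zero hmod
  have hmle : m ≤ cs.length := Nat.le_of_dvd hn hmdvd
  have hLpos : 0 < cs.length / m := (Nat.one_le_div_iff (by omega)).mpr hmle
  have hLdvd : (cs.length / m) ∣ cs.length := Nat.div_dvd_of_dvd hmdvd
  have hLmod : cs.length % (cs.length / m) = 0 := Nat.dvd_iff_mod_eq_zero.mp hLdvd
  have hQ' : chkQ cs (cs.length / m) :=
    ⟨hLpos, hLmod, (patternOk_iff cs _ hLpos hLmod).mp hpat⟩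
  have h2 : Lmin cs h ≤ cs.length / m := Lmin_min cs h hQ'
  have h3 : cs.length / (cs.length / m) ≤ cs.length / Lmin cs h :=
    Nat.div_le_div_left h2 (Lmin_pos cs h)
  rw [Nat.div_div_self hmdvd (by omega)] at h3
  omega

-- A's loop returns n / Lmin from any start ≥ n / Lmin
theorem solLoop_eq (cs : List Char) (h : cs ≠ []) :
    ∀ m : Nat, cs.length / Lmin cs h ≤ m →
      solLoop cs (m : Int) = ((cs.length / Lmin cs h : Nat) : Int) := by
  have hn : 0 < cs.length := List.length_pos_iff.mpr h
  have hqpos : 0 < cs.length / Lmin cs h :=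
    (Nat.one_le_div_iff (Lmin_pos cs h)).mpr (Lmin_le cs h)
  refine Nat.le_induction ?_ ?_
  · -- start exactly at q := n / Lmin
    by_cases hq1 : 1 < cs.length / Lmin cs h
    · rw [solLoop, if_pos (by exact_mod_cast hq1)]
      have hqdvd : (cs.length / Lmin cs h) ∣ cs.length := Nat.div_dvd_of_dvd (Lmin_dvd cs h)
      have hqmod : cs.length % (cs.length / Lmin cs h) = 0 := Nat.dvd_iff_mod_eq_zero.mp hqdvd
      have hback : cs.length / (cs.length / Lmin cs h) = Lmin cs h :=
        Nat.div_div_self (Lmin_dvd cs h) (by omega)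
      have hpat : pattern_ok cs ((cs.length / (cs.length / Lmin cs h) : Nat) : Int) = true := by
        rw [hback]
        exact (patternOk_iff cs _ (Lmin_pos cs h) (Lmin_spec cs h).2.1).mpr (Lmin_spec cs h).2.2
      rw [if_pos]
      rw [PySem.Int.mod_natCast, PySem.Int.floordiv_natCast, hqmod]
      simpa using hpat
    · have hq : cs.length / Lmin cs h = 1 := by omega
      rw [solLoop, if_neg (by rw [hq]; norm_num)]
  · -- step from m to m + 1, with m ≥ q
    intro m hm ih
    have hguard : ¬ ((PySem.Int.mod (cs.length : Int) ((m + 1 : Nat) : Int) == 0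
        && pattern_ok cs (PySem.Int.floordiv (cs.length : Int) ((m + 1 : Nat) : Int))) = true) := by
      rw [PySem.Int.mod_natCast, PySem.Int.floordiv_natCast]
      intro hcond
      rw [Bool.and_eq_true] at hcond
      have hmod : cs.length % (m + 1) = 0 := by
        have h' := beq_iff_eq.mp hcond.1
        exact_mod_cast h'
      exact guardFalseAbove cs h (by omega) (by omega) ⟨hmod, hcond.2⟩
    have hstep : ((m + 1 : Nat) : Int) - 1 = (m : Nat) := by push_cast; ring
    rw [solLoop, if_pos (by exact_mod_cast (by omega : (1:Int) < ((m+1 : Nat) : Int)))]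
    rw [if_neg hguard, hstep, ih]

-- B's scan over a sorted list of positive divisors containing Lmin returns n / Lmin
theorem scanLoop_eq (cs : List Char) (h : cs ≠ []) :
    ∀ DS : List Nat, DS.Pairwise (· < ·) → (∀ L ∈ DS, 0 < L ∧ L ∣ cs.length) →
      Lmin cs h ∈ DS → scanLoop cs cs.length DS = ((cs.length / Lmin cs h : Nat) : Int) := by
  intro DS
  induction DS with
  | nil => intro _ _ hmem; simp at hmem
  | cons L0 rest ih =>
    intro hpw hprops hmem
    have hL0 := hprops L0 (List.mem_cons_self)
    rw [scanLoop]
    by_cases hc : cs = (List.replicate (cs.length / L0) (cs.take L0)).flatten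
    · rw [if_pos (beq_iff_eq.mpr hc)]
      have hQ0 : chkQ cs L0 := ⟨hL0.1, Nat.dvd_iff_mod_eq_zero.mp hL0.2, hc⟩
      have hle : Lmin cs h ≤ L0 := Lmin_min cs h hQ0
      have : Lmin cs h = L0 := by
        rcases List.mem_cons.mp hmem with heq | htail
        · exact heq
        · have := (List.pairwise_cons.mp hpw).1 _ htail
          omega
      rw [this]
    · rw [if_neg (by simpa using hc)]
      have hne : Lmin cs h ≠ L0 := by
        intro heq
        exact hc (by rw [← heq]; exact (Lmin_spec cs h).2.2)
      exact ih (List.pairwise_cons.mp hpw).2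
        (fun L hL => hprops L (List.mem_cons_of_mem _ hL))
        (List.mem_cons.mp hmem |>.resolve_left hne)

def smallDivs (n i : Nat) : List Nat :=
  (List.range' i (Nat.sqrt n + 1 - i)).filter (fun d => n % d = 0)

def largeDivs (n i : Nat) : List Nat :=
  ((List.range' i (Nat.sqrt n + 1 - i)).filter (fun d => n % d = 0 && d ≠ n / d)).map (n / ·)

theorem smallDivs_step (n i : Nat) (h : i ≤ Nat.sqrt n) :
    smallDivs n i = (if n % i = 0 then [i] else []) ++ smallDivs n (i + 1) := by
  unfold smallDivs
  rw [show Nat.sqrt n + 1 - i = (Nat.sqrt n + 1 - (i + 1)) + 1 by omega, List.range'_succ,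
    List.filter_cons]
  by_cases hm : n % i = 0 <;> simp [hm]

theorem largeDivs_step (n i : Nat) (h : i ≤ Nat.sqrt n) :
    largeDivs n i = (if n % i = 0 ∧ i ≠ n / i then [n / i] else []) ++ largeDivs n (i + 1) := by
  unfold largeDivs
  rw [show Nat.sqrt n + 1 - i = (Nat.sqrt n + 1 - (i + 1)) + 1 by omega, List.range'_succ,
    List.filter_cons]
  by_cases hm : n % i = 0
  · by_cases hd : i = n / i
    · have hC : decide (i ≠ n / i) = false := decide_eq_false (fun hne => hne hd)
      simp [hm, hC]
      exact hd
    · simp [hm, hd]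
  · simp [hm]

theorem divLoop_spec : ∀ (n i : Nat) (small large : List Nat),
    divLoop n i small large = (small ++ smallDivs n i, large ++ largeDivs n i) := by
  intro n i small large
  refine divLoop.induct n
    (fun i small large =>
      divLoop n i small large = (small ++ smallDivs n i, large ++ largeDivs n i))
    ?_ ?_ ?_ i small large
  · intro i small large h hmod ih
    simp only [dite_eq_ite] at ih
    have hiS : i ≤ Nat.sqrt n := Nat.le_sqrt.mpr h
    rw [divLoop, dif_pos h, if_pos hmod, ih, smallDivs_step n i hiS, largeDivs_step n i hiS]
    by_cases hd : i = n / i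
    · have h1 : ¬ (i ≠ n / i) := fun hne => hne hd
      rw [if_pos hmod, if_neg h1, if_neg (fun hc => h1 hc.2)]
      simp [List.append_assoc]
    · rw [if_pos hmod, if_pos hd, if_pos ⟨hmod, hd⟩]
      simp [List.append_assoc]
  · intro i small large h hmod ih
    have hiS : i ≤ Nat.sqrt n := Nat.le_sqrt.mpr h
    rw [divLoop, dif_pos h, if_neg hmod, ih, smallDivs_step n i hiS, largeDivs_step n i hiS]
    simp [hmod]
  · intro i small large h
    have : Nat.sqrt n + 1 - i = 0 := by
      have : Nat.sqrt n < i := by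
        by_contra hcon
        exact h (Nat.le_sqrt.mp (by omega))
      omega
    rw [divLoop, dif_neg h]
    simp [smallDivs, largeDivs, this]

-- the concatenated divisor list consists of positive divisors …
theorem DS_props (n : Nat) (hn : 0 < n) :
    ∀ L ∈ smallDivs n 1 ++ (largeDivs n 1).reverse, 0 < L ∧ L ∣ n := by
  intro L hL
  rcases List.mem_append.mp hL with hs | hl
  · obtain ⟨hr, hm⟩ := List.mem_filter.mp hs
    have := List.mem_range'_1.mp hr
    exact ⟨by omega, Nat.dvd_of_mod_eq_zero (by simpa using hm)⟩
  · rw [List.mem_reverse] at hl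
    obtain ⟨d, hd, rfl⟩ := List.mem_map.mp hl
    obtain ⟨hr, hm⟩ := List.mem_filter.mp hd
    have hdr := List.mem_range'_1.mp hr
    simp only [Bool.and_eq_true, decide_eq_true_eq] at hm
    have hddvd : d ∣ n := Nat.dvd_of_mod_eq_zero hm.1
    have hdn : d ≤ n := Nat.le_of_dvd hn hddvd
    exact ⟨(Nat.one_le_div_iff (by omega)).mpr hdn, Nat.div_dvd_of_dvd hddvd⟩

-- … is sorted strictly increasing …
theorem DS_pairwise (n : Nat) (hn : 0 < n) :
    (smallDivs n 1 ++ (largeDivs n 1).reverse).Pairwise (· < ·) := by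
  have hpwr : (List.range' 1 (Nat.sqrt n + 1 - 1)).Pairwise (· < ·) :=
    List.pairwise_lt_range' 1 (by norm_num)
  have hsmall : (smallDivs n 1).Pairwise (· < ·) :=
    List.Pairwise.sublist List.filter_sublist hpwr
  rw [List.pairwise_append]
  refine ⟨hsmall, ?_, ?_⟩
  · rw [List.pairwise_reverse]
    unfold largeDivs
    rw [List.pairwise_map]
    have hpwf : ((List.range' 1 (Nat.sqrt n + 1 - 1)).filter
        (fun d => n % d = 0 && d ≠ n / d)).Pairwise (· < ·) :=
      List.Pairwise.sublist List.filter_sublist hpwr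
    refine List.Pairwise.imp_of_mem ?_ hpwf
    intro a b ha hb hab
    obtain ⟨har, ham⟩ := List.mem_filter.mp ha
    obtain ⟨hbr, hbm⟩ := List.mem_filter.mp hb
    simp only [Bool.and_eq_true, decide_eq_true_eq] at ham hbm
    have hadvd := Nat.dvd_of_mod_eq_zero ham.1
    have hbdvd := Nat.dvd_of_mod_eq_zero hbm.1
    have hapos : 0 < a := by have := List.mem_range'_1.mp har; omega
    have hle : n / b ≤ n / a := Nat.div_le_div_left (by omega) hapos
    have hne : n / b ≠ n / a := by
      intro heq
      have ha' : n / (n / a) = a := Nat.div_div_self hadvd (by omega)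
      have hb' : n / (n / b) = b := Nat.div_div_self hbdvd (by omega)
      rw [heq] at hb'
      omega
    omega
  · intro a ha x hx
    obtain ⟨har, _⟩ := List.mem_filter.mp ha
    have haS : a ≤ Nat.sqrt n := by have := List.mem_range'_1.mp har; omega
    rw [List.mem_reverse] at hx
    obtain ⟨d, hd, rfl⟩ := List.mem_map.mp hx
    obtain ⟨hdr, hdm⟩ := List.mem_filter.mp hd
    simp only [Bool.and_eq_true, decide_eq_true_eq] at hdm
    have hdS : d ≤ Nat.sqrt n := by have := List.mem_range'_1.mp hdr; omega
    have hdpos : 0 < d := by have := List.mem_range'_1.mp hdr; omega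
    have hddvd := Nat.dvd_of_mod_eq_zero hdm.1
    have hmul : d * (n / d) = n := Nat.mul_div_cancel' hddvd
    have hdd : d * d ≤ n := Nat.le_sqrt.mp hdS
    have hlt : d < n / d := by
      have hle : d ≤ n / d := by
        by_contra hcon
        have : n / d < d := by omega
        nlinarith
      rcases Nat.lt_or_ge d (n / d) with h' | h'
      · exact h'
      · have : d = n / d := by omega
        exact absurd this hdm.2
    have : n < (n / d) * (n / d) := by nlinarith
    have : Nat.sqrt n < n / d := Nat.sqrt_lt.mpr this
    omega

-- … and contains every positive divisor (in particular Lmin)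
theorem DS_mem (n : Nat) (hn : 0 < n) {L : Nat} (hL : 0 < L) (hdvd : L ∣ n) :
    L ∈ smallDivs n 1 ++ (largeDivs n 1).reverse := by
  have hLn : L ≤ n := Nat.le_of_dvd hn hdvd
  have hmod : n % L = 0 := Nat.dvd_iff_mod_eq_zero.mp hdvd
  by_cases hsml : L ≤ Nat.sqrt n
  · refine List.mem_append.mpr (Or.inl ?_)
    refine List.mem_filter.mpr ⟨List.mem_range'_1.mpr ⟨by omega, by omega⟩, by simpa using hmod⟩
  · have hlrg : Nat.sqrt n < L := by omega
    refine List.mem_append.mpr (Or.inr ?_)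
    rw [List.mem_reverse]
    set d := n / L with hdL
    have hddvd : d ∣ n := Nat.div_dvd_of_dvd hdvd
    have hdpos : 0 < d := (Nat.one_le_div_iff (by omega)).mpr hLn
    have hback : n / d = L := Nat.div_div_self hdvd (by omega)
    have hdS : d ≤ Nat.sqrt n := by
      have h1 : n < (Nat.sqrt n + 1) * (Nat.sqrt n + 1) := Nat.lt_succ_sqrt n
      have h2 : d * L = n := Nat.div_mul_cancel hdvd
      by_contra hcon
      have : Nat.sqrt n + 1 ≤ d := by omega
      nlinarith
    have hdm : n % d = 0 := Nat.dvd_iff_mod_eq_zero.mp hddvd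
    refine List.mem_map.mpr ⟨d, List.mem_filter.mpr ⟨List.mem_range'_1.mpr ⟨by omega, by omega⟩, ?_⟩, hback⟩
    simp only [Bool.and_eq_true, decide_eq_true_eq]
    exact ⟨hdm, by omega⟩

-- ===== VERDICT (by name: the statement is the Claim_ definition above) =====
theorem solution_spec : Claim_equal_solution := by
  intro s _
  unfold Spec_solution solution solution_alt
  by_cases hnil : s.toList = []
  · simp [hnil]
  · have hn : 0 < s.toList.length := List.length_pos_iff.mpr hnil
    rw [if_neg (by omega), if_neg (by omega)]
    show solLoop s.toList
        (PySem.Int.floordiv (s.toList.length : Int) ((PySem.List.dedup s.toList).length : Int))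
      = scanLoop s.toList s.toList.length
          ((divLoop s.toList.length 1 [] []).1 ++ (divLoop s.toList.length 1 [] []).2.reverse)
    have hdpos : 0 < (PySem.List.dedup s.toList).length := by
      obtain ⟨x, hx⟩ := List.exists_mem_of_ne_nil _ hnil
      exact List.length_pos_iff.mpr
        (List.ne_nil_of_mem ((PySem.List.mem_dedup _ x).mpr hx))
    have hdle : (PySem.List.dedup s.toList).length ≤ Lmin s.toList hnil :=
      dedup_le _ (Lmin_spec _ hnil)
    have hge : s.toList.length / Lmin s.toList hnil
        ≤ s.toList.length / (PySem.List.dedup s.toList).length :=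
      Nat.div_le_div_left hdle hdpos
    rw [PySem.Int.floordiv_natCast, solLoop_eq s.toList hnil _ hge]
    rw [divLoop_spec s.toList.length 1 [] []]
    simp only [List.nil_append]
    rw [scanLoop_eq s.toList hnil _ (DS_pairwise _ hn) (DS_props _ hn)
      (DS_mem _ hn (Lmin_pos _ hnil) (Lmin_dvd _ hnil))]
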